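-- pv_equiv track=rewrite | github.com/Iyongbudiarso/generate-video | render_video.py | split_text_to_pages
-- ===== SOURCE A (Python) =====
-- import math
--
-- def split_text_to_pages(text, n_pages):
--     """Membagi teks menjadi beberapa halaman secara proporsional."""
--     if n_pages <= 1:
--         return [text]
--     words = text.split()
--     total_words = len(words)
--     if total_words == 0:
--         return [""] * n_pages
--     words_per_page = math.ceil(total_words / n_pages)
--     pages = []
--     for i in range(n_pages):
--         start = i * words_per_page
--         end = (i + 1) * words_per_page
--         pages.append(" ".join(words[start:end]))
--     return pages
-- ===== SOURCE B (Python) =====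
-- def split_text_to_pages(text, n_pages):
--     """Membagi teks menjadi beberapa halaman secara proporsional."""
--     if n_pages <= 1:
--         return [text]
--     words = text.split()
--     if not words:
--         return [""] * n_pages
--     per = -(-len(words) // n_pages)  # exact integer ceiling
--     pages = []
--     for _ in range(n_pages):
--         pages.append(" ".join(words[:per]))
--         words = words[per:]
--     return pages
-- ===== Notes on version B (the rewrite author's own statement) =====
-- stated objective: alternative
-- what changed: Instead of looping over page indices and slicing words[start:end] with computed offsets, B consumes the word list: each of the n_pages iterations joins the first words_per_page words and drops them from the remaining list.
import Mathlib
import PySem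

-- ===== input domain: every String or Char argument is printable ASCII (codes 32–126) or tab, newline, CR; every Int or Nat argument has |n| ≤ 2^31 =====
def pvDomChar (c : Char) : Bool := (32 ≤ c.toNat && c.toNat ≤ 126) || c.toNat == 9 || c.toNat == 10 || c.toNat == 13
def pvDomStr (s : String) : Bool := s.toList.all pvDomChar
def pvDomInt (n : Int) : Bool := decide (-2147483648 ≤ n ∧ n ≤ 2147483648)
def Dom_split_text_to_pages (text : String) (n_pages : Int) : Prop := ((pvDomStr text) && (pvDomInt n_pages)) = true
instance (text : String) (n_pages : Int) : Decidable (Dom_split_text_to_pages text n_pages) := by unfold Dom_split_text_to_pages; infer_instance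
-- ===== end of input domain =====

-- B builds the pages by repeatedly taking the first words_per_page words off the remaining word
-- list (consuming it), instead of A's loop over page indices with computed start/end slices;
-- objective: alternative decomposition, same cost.

-- ===== PORT A =====
-- math.ceil(total/n_pages) is ported as the integer ceiling -((-total) // n_pages); exact here
-- (float rounding cannot cross an integer for these magnitudes).
def split_text_to_pages (text : String) (n_pages : Int) : List String :=
  if n_pages ≤ 1 then [text]
  else
    let words := PySem.Str.split₀ text
    let total : Int := (words.length : Int)
    if total = 0 then PySem.List.pyRepeat [""] n_pages
    else
      let words_per_page : Int := -(PySem.Int.floordiv (-total) n_pages)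
      (PySem.List.pyRange 0 n_pages 1).foldl
        (fun pages i =>
          pages ++ [PySem.Str.join " " (PySem.List.slice words (some (i * words_per_page)) (some ((i + 1) * words_per_page)))])
        []

-- ===== PORT B =====
-- the 'for _ in range(n_pages)' loop of Source B: per iteration emit ' '.join(words[:per]) and
-- replace words by words[per:]
def pvPagesB (per : Int) : Nat → List String → List String
  | 0, _ => []
  | k + 1, ws =>
      PySem.Str.join " " (PySem.List.slice ws none (some per)) ::
        pvPagesB per k (PySem.List.slice ws (some per) none)

def split_text_to_pages_alt (text : String) (n_pages : Int) : List String :=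
  if n_pages ≤ 1 then [text]
  else
    let words := PySem.Str.split₀ text
    if words.length = 0 then PySem.List.pyRepeat [""] n_pages
    else
      let per : Int := -(PySem.Int.floordiv (-(words.length : Int)) n_pages)
      pvPagesB per n_pages.toNat words

-- ===== PRECONDITION & SPEC =====
def Spec_split_text_to_pages (text : String) (n_pages : Int) (out : List String) : Prop := out = split_text_to_pages_alt text n_pages
instance (text : String) (n_pages : Int) (out : List String) : Decidable (Spec_split_text_to_pages text n_pages out) := by unfold Spec_split_text_to_pages; infer_instance

-- ===== CLAIM (what is proved, stated in full; the proofs are below) =====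
def Claim_equal_split_text_to_pages : Prop := ∀ (text : String) (n_pages : Int), Dom_split_text_to_pages text n_pages → Spec_split_text_to_pages text n_pages (split_text_to_pages text n_pages)

-- ===== LEMMAS AND PROOFS =====

-- B's loop unrolled: k iterations starting from ws produce the pages
-- ' '.join(ws[i*p : i*p + p]) for i = 0 .. k-1.
theorem pvPagesB_eq (p : Nat) (k : Nat) (ws : List String) :
    pvPagesB (p : Int) k ws =
      (List.range k).map (fun i => PySem.Str.join " " ((ws.drop (i * p)).take p)) := by
  induction k generalizing ws with
  | zero => simp [pvPagesB]
  | succ k ih =>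
      rw [List.range_succ_eq_map]
      simp only [pvPagesB, PySem.List.slice_to_natCast, PySem.List.slice_from_natCast, ih,
        List.map_cons, List.map_map]
      refine congrArg₂ _ (by simp) ?_
      apply List.map_congr_left
      intro i _
      simp only [Function.comp, Nat.succ_eq_add_one, List.drop_drop]
      congr 3
      rw [Nat.add_mul]
      omega

-- A's slice for page i equals take/drop with Nat arithmetic.
theorem sliceA_eq (ws : List String) (i p : Nat) :
    PySem.List.slice ws (some ((i : Int) * (p : Int))) (some (((i : Int) + 1) * (p : Int))) =
      (ws.drop (i * p)).take p := by
  have h1 : ((i : Int) * (p : Int)) = ((i * p : Nat) : Int) := by push_cast; ring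
  have h2 : (((i : Int) + 1) * (p : Int)) = (((i * p + p : Nat)) : Int) := by push_cast; ring
  rw [h1, h2, PySem.List.slice_natCast]
  congr 1
  omega

-- ===== VERDICT (by name: the statement is the Claim_ definition above) =====
theorem split_text_to_pages_spec : Claim_equal_split_text_to_pages := by
  intro text n_pages _
  unfold Spec_split_text_to_pages split_text_to_pages split_text_to_pages_alt
  by_cases h1 : n_pages ≤ 1
  · simp [h1]
  · simp only [h1, if_false]
    set words := PySem.Str.split₀ text with hw
    by_cases h0 : words.length = 0
    · simp [h0]
    · have hlen : (0:Int) < (words.length : Int) := by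
        have : 0 < words.length := Nat.pos_of_ne_zero h0
        exact_mod_cast this
      simp only [h0, if_false, hlen.ne']
      set per : Int := -(PySem.Int.floordiv (-(words.length : Int)) n_pages) with hper
      have hn : (0:Int) < n_pages := by omega
      have hbounds := (PySem.Int.neg_floordiv_neg_eq_iff_of_pos (a := (words.length : Int))
        (b := n_pages) (q := per) hn).mp rfl
      have hperpos : 0 < per := by nlinarith [hbounds.1, hbounds.2]
      have hpercast : per = ((per.toNat : Nat) : Int) := by omega
      rw [PySem.List.foldl_append_singleton_eq_map, List.nil_append,
        PySem.List.pyRange_zero, List.map_map, hpercast, pvPagesB_eq]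
      apply List.map_congr_left
      intro i _
      simp only [Function.comp]
      rw [sliceA_eq]
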